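-- pv_equiv track=rewrite | github.com/JacksonJW/practice-problems-interview-prep | leetcode/python3/find_frequency.py | count_occurrences_left_and_right
-- ===== SOURCE A (Python) =====
-- def count_occurrences_left_and_right(index, arr, num):
--     if index == -1:
--         return 0
--
--     # check left
--     count = 1
--     left = index-1
--     while left >= 0 and arr[left] == num:
--         count += 1
--         left -= 1
--
--     # check right
--     right = index+1
--     while right < len(arr) and arr[right] == num:
--         count += 1
--         right += 1
--
--     return count
-- ===== SOURCE B (Python) =====
-- def count_occurrences_left_and_right(index, arr, num):
--     if index == -1:
--         return 0
--     # forward pass over the whole prefix: streak = length of num-run ending at i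
--     streak_left = 0
--     for i in range(index):
--         streak_left = streak_left + 1 if arr[i] == num else 0
--     # backward pass over the whole suffix: streak = length of num-run starting at i
--     streak_right = 0
--     for i in reversed(range(index + 1, len(arr))):
--         streak_right = streak_right + 1 if arr[i] == num else 0
--     return 1 + streak_left + streak_right
-- ===== Notes on version B (the rewrite author's own statement) =====
-- stated objective: alternative
-- what changed: Replaces A's two outward early-exit walks from the index by a full forward pass over the prefix and a full backward pass over the suffix, each maintaining a resetting run-length (streak) accumulator.
import Mathlib
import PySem

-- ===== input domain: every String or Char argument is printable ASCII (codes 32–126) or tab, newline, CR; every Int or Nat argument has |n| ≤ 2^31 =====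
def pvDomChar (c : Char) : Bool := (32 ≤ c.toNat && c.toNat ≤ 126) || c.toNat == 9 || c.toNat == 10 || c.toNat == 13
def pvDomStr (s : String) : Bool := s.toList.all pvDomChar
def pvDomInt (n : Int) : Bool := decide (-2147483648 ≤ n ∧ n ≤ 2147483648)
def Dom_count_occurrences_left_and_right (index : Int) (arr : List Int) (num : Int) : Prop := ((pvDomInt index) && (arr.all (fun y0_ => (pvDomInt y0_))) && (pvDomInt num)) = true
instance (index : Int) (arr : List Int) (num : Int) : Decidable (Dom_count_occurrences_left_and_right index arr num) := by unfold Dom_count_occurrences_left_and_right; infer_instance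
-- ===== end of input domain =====

-- B replaces A's outward early-exit walks from the index by a full forward pass over the
-- prefix and a full backward pass over the suffix, each keeping a resetting streak accumulator
-- (alternative decomposition; same return value wherever A returns).

-- ===== PORT A =====
-- while left >= 0 and arr[left] == num: count += 1; left -= 1
def pvALeft (arr : List Int) (num : Int) (count left : Int) : Int :=
  if h : 0 ≤ left ∧ PySem.List.pyGet? arr left = some num then
    pvALeft arr num (count + 1) (left - 1)
  else count
termination_by (left + 1).toNat
decreasing_by omega

-- while right < len(arr) and arr[right] == num: count += 1; right += 1
def pvARight (arr : List Int) (num : Int) (count right : Int) : Int :=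
  if h : right < (arr.length : Int) ∧ PySem.List.pyGet? arr right = some num then
    pvARight arr num (count + 1) (right + 1)
  else count
termination_by ((arr.length : Int) - right).toNat
decreasing_by omega

def count_occurrences_left_and_right (index : Int) (arr : List Int) (num : Int) : Int :=
  if index = -1 then 0
  else pvARight arr num (pvALeft arr num 1 (index - 1)) (index + 1)

-- ===== PORT B =====
-- streak = streak + 1 if arr[i] == num else 0   (arr[i] is in range on every admitted input)
def pvBStep (arr : List Int) (num : Int) (streak i : Int) : Int :=
  if PySem.List.pyGetD arr i 0 = num then streak + 1 else 0

def count_occurrences_left_and_right_alt (index : Int) (arr : List Int) (num : Int) : Int :=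
  if index = -1 then 0
  else
    let streakLeft := (PySem.List.pyRange 0 index 1).foldl (pvBStep arr num) 0
    let streakRight :=
      ((PySem.List.pyRange (index + 1) (arr.length : Int) 1).reverse).foldl (pvBStep arr num) 0
    1 + streakLeft + streakRight

-- ===== PRECONDITION & SPEC =====
-- Pre_ is exactly the set of inputs on which the Python A returns normally: for
-- index > len(arr) or index < -len(arr)-1 A raises IndexError (arr[left] resp. arr[right]).
def Pre_count_occurrences_left_and_right (index : Int) (arr : List Int) (num : Int) : Prop :=
  -((arr.length : Int) + 1) ≤ index ∧ index ≤ (arr.length : Int)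
instance (index : Int) (arr : List Int) (num : Int) : Decidable (Pre_count_occurrences_left_and_right index arr num) := by unfold Pre_count_occurrences_left_and_right; infer_instance

def pvWitness_count_occurrences_left_and_right : Int × List Int × Int := (1, [2, 2, 2], 2)

def Spec_count_occurrences_left_and_right (index : Int) (arr : List Int) (num : Int) (out : Int) : Prop := out = count_occurrences_left_and_right_alt index arr num
instance (index : Int) (arr : List Int) (num : Int) (out : Int) : Decidable (Spec_count_occurrences_left_and_right index arr num out) := by unfold Spec_count_occurrences_left_and_right; infer_instance

-- ===== CLAIM (what is proved, stated in full; the proofs are below) =====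
def Claim_equal_count_occurrences_left_and_right : Prop := ∀ (index : Int) (arr : List Int) (num : Int), Dom_count_occurrences_left_and_right index arr num → Pre_count_occurrences_left_and_right index arr num → Spec_count_occurrences_left_and_right index arr num (count_occurrences_left_and_right index arr num)

-- ===== LEMMAS AND PROOFS =====

-- the resetting streak fold over a list of elements = length of the trailing num-run
lemma streak_foldl_eq (num : Int) (xs : List Int) :
    xs.foldl (fun s x => if x = num then s + 1 else 0) (0 : Int)
      = ((xs.reverse.takeWhile (· == num)).length : Int) := by
  induction xs using List.reverseRecOn with
  | nil => simp
  | append_singleton xs x ih =>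
    by_cases h : x = num
    · subst h
      simp [List.foldl_append, ih]
    · simp [List.foldl_append, h]

-- A's right walk, nonnegative start
lemma pvARight_eq (arr : List Int) (num : Int) (c j : Int) (hj : 0 ≤ j) :
    pvARight arr num c j = c + ((arr.drop j.toNat).takeWhile (· == num)).length := by
  fun_induction pvARight with
  | case1 c j h ih =>
    obtain ⟨hlt, hget⟩ := h
    have hjn : j.toNat < arr.length := by omega
    have hx : arr[j.toNat] = num := by
      rw [PySem.List.pyGet?_eq_some_getElem arr hj (by omega)] at hget
      exact Option.some.inj hget
    have hd : arr.drop j.toNat = arr[j.toNat] :: arr.drop (j.toNat + 1) :=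
      List.drop_eq_getElem_cons hjn
    have hjn1 : (j + 1).toNat = j.toNat + 1 := by omega
    rw [hd, hx, List.takeWhile_cons]
    simp only [BEq.rfl, if_true]
    rw [ih (by omega), hjn1]
    simp only [List.length_cons]
    push_cast; ring
  | case2 c j h =>
    by_cases hlen : j < (arr.length : Int)
    · have hjn : j.toNat < arr.length := by omega
      have hget : PySem.List.pyGet? arr j = some arr[j.toNat] :=
        PySem.List.pyGet?_eq_some_getElem arr hj (by omega)
      have hx : arr[j.toNat] ≠ num := by
        intro hcon; exact h ⟨hlen, by rw [hget, hcon]⟩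
      have hd : arr.drop j.toNat = arr[j.toNat] :: arr.drop (j.toNat + 1) :=
        List.drop_eq_getElem_cons hjn
      rw [hd, List.takeWhile_cons]
      simp [hx]
    · have : arr.length ≤ j.toNat := by omega
      rw [List.drop_eq_nil_of_le this]
      simp

-- A's right walk started at a negative index (Python wraparound region)
lemma pvARight_neg_eq (arr : List Int) (num : Int) :
    ∀ (n : Nat) (c j : Int), (-j).toNat = n → -(arr.length : Int) ≤ j → j ≤ 0 →
      pvARight arr num c j
        = c + (((arr.drop ((arr.length : Int) + j).toNat ++ arr).takeWhile (· == num)).length : Int) := by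
  intro n
  induction n with
  | zero =>
    intro c j hn h1 h2
    have hj : j = 0 := by omega
    subst hj
    have : ((arr.length : Int) + 0).toNat = arr.length := by omega
    rw [this, List.drop_length, List.nil_append, pvARight_eq arr num c 0 le_rfl]
    simp
  | succ n ih =>
    intro c j hn h1 h2
    have hjneg : j < 0 := by omega
    have hlen : 1 ≤ arr.length := by omega
    have hk : 0 < (-j).toNat ∧ (-j).toNat ≤ arr.length := by omega
    have hget : PySem.List.pyGet? arr j = arr[arr.length - (-j).toNat]? := by
      have := PySem.List.pyGet?_neg_natCast arr (-j).toNat hk.1 hk.2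
      rwa [show (-((-j).toNat : Int)) = j by omega] at this
    have hidx : arr.length - (-j).toNat = ((arr.length : Int) + j).toNat := by omega
    have hlt : ((arr.length : Int) + j).toNat < arr.length := by omega
    have hget2 : PySem.List.pyGet? arr j = some arr[((arr.length : Int) + j).toNat] := by
      rw [hget, hidx, List.getElem?_eq_getElem hlt]
    have hd : arr.drop ((arr.length : Int) + j).toNat
        = arr[((arr.length : Int) + j).toNat] :: arr.drop (((arr.length : Int) + j).toNat + 1) :=
      List.drop_eq_getElem_cons hlt
    by_cases hx : arr[((arr.length : Int) + j).toNat] = num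
    · rw [pvARight]
      have hcond : j < (arr.length : Int) ∧ PySem.List.pyGet? arr j = some num := by
        exact ⟨by omega, by rw [hget2, hx]⟩
      rw [dif_pos hcond]
      rw [ih (c + 1) (j + 1) (by omega) (by omega) (by omega)]
      have h1' : ((arr.length : Int) + j).toNat + 1 = ((arr.length : Int) + (j + 1)).toNat := by omega
      rw [hd, hx, List.cons_append, List.takeWhile_cons]
      simp only [BEq.rfl, if_true, List.length_cons, h1']
      push_cast; ring
    · rw [pvARight]
      have hcond : ¬ (j < (arr.length : Int) ∧ PySem.List.pyGet? arr j = some num) := by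
        intro hc
        apply hx
        have := hc.2
        rw [hget2] at this
        exact Option.some.inj this
      rw [dif_neg hcond, hd, List.cons_append, List.takeWhile_cons]
      simp [hx]

-- A's left walk
lemma pvALeft_eq (arr : List Int) (num : Int) (c l : Int) (hl : -1 ≤ l)
    (hl2 : l < (arr.length : Int)) :
    pvALeft arr num c l = c + (((arr.take (l + 1).toNat).reverse).takeWhile (· == num)).length := by
  fun_induction pvALeft with
  | case1 c l h ih =>
    obtain ⟨hge, hget⟩ := h
    have hln : l.toNat < arr.length := by omega
    have hx : arr[l.toNat] = num := by
      rw [PySem.List.pyGet?_eq_some_getElem arr hge (by omega)] at hget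
      exact Option.some.inj hget
    have h1 : (l + 1).toNat = l.toNat + 1 := by omega
    have ht : arr.take (l.toNat + 1) = arr.take l.toNat ++ [arr[l.toNat]] := by
      rw [List.take_add_one]
      simp [List.getElem?_eq_getElem hln]
    have h2 : (l - 1 + 1).toNat = l.toNat := by omega
    rw [h1, ht, List.reverse_append, List.reverse_singleton, List.singleton_append,
      List.takeWhile_cons, hx]
    simp only [BEq.rfl, if_true]
    rw [ih (by omega) (by omega), h2]
    simp only [List.length_cons]
    push_cast; ring
  | case2 c l h =>
    by_cases hge : 0 ≤ l
    · have hln : l.toNat < arr.length := by omega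
      have hget : PySem.List.pyGet? arr l = some arr[l.toNat] :=
        PySem.List.pyGet?_eq_some_getElem arr hge (by omega)
      have hx : arr[l.toNat] ≠ num := by
        intro hcon; exact h ⟨hge, by rw [hget, hcon]⟩
      have h1 : (l + 1).toNat = l.toNat + 1 := by omega
      have ht : arr.take (l.toNat + 1) = arr.take l.toNat ++ [arr[l.toNat]] := by
        rw [List.take_add_one]
        simp [List.getElem?_eq_getElem hln]
      rw [h1, ht, List.reverse_append, List.reverse_singleton, List.singleton_append,
        List.takeWhile_cons]
      simp [hx]
    · have : l = -1 := by omega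
      subst this
      simp

-- B's index fold = the element fold over the mapped list
lemma pvB_fold_map (arr : List Int) (num : Int) (l : List Int) :
    l.foldl (pvBStep arr num) 0
      = (l.map (fun i => PySem.List.pyGetD arr i 0)).foldl
          (fun s x => if x = num then s + 1 else 0) (0 : Int) := by
  rw [List.foldl_map]
  rfl

-- range prefix mapped through pyGetD = take
lemma map_pyGetD_range_take (arr : List Int) (b : Int) (h0 : 0 ≤ b)
    (hb : b ≤ (arr.length : Int)) :
    (PySem.List.pyRange 0 b 1).map (fun i => PySem.List.pyGetD arr i 0)
      = arr.take b.toNat := by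
  apply List.ext_getElem
  · simp [PySem.List.length_pyRange_one]
    omega
  · intro k h1 h2
    simp only [List.getElem_map, PySem.List.getElem_pyRange_one, List.getElem_take]
    have hk : k < b.toNat := by
      simpa [PySem.List.length_pyRange_one] using h1
    rw [show ((0 : Int) + k) = ((k : Nat) : Int) by omega,
      PySem.List.pyGetD_natCast, List.getD_eq_getElem arr 0 (by omega)]

-- negative range mapped through pyGetD = the tail of arr (wraparound reading)
lemma map_pyGetD_range_neg (arr : List Int) (a : Int) (h1 : -(arr.length : Int) ≤ a)
    (h2 : a ≤ 0) :
    (PySem.List.pyRange a 0 1).map (fun i => PySem.List.pyGetD arr i 0)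
      = arr.drop ((arr.length : Int) + a).toNat := by
  apply List.ext_getElem
  · simp [PySem.List.length_pyRange_one]
    omega
  · intro k hk1 hk2
    simp only [List.getElem_map, PySem.List.getElem_pyRange_one, List.getElem_drop]
    have hk : k < (0 - a).toNat := by
      simpa [PySem.List.length_pyRange_one] using hk1
    have hneg : a + (k : Int) < 0 := by omega
    have hm : 0 < (-(a + (k : Int))).toNat ∧ (-(a + (k : Int))).toNat ≤ arr.length := by omega
    have := PySem.List.pyGetD_neg_natCast arr (-(a + (k : Int))).toNat 0 hm.1 hm.2
    rw [show (-(((-(a + (k : Int))).toNat : Nat) : Int)) = a + k by omega] at this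
    rw [this]
    congr 1
    omega

-- ===== VERDICT (by name: the statement is the Claim_ definition above) =====
theorem count_occurrences_left_and_right_spec : Claim_equal_count_occurrences_left_and_right := by
  intro index arr num _ hpre
  obtain ⟨h1, h2⟩ := hpre
  unfold Spec_count_occurrences_left_and_right
  unfold count_occurrences_left_and_right count_occurrences_left_and_right_alt
  by_cases hidx : index = -1
  · simp [hidx]
  · simp only [hidx, if_false]
    by_cases hge : 0 ≤ index
    · -- nonnegative index: prefix streak + suffix streak
      have hA : pvALeft arr num 1 (index - 1)
          = 1 + (((arr.take index.toNat).reverse).takeWhile (· == num)).length := by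
        have := pvALeft_eq arr num 1 (index - 1) (by omega) (by omega)
        rwa [show (index - 1 + 1).toNat = index.toNat by omega] at this
      rw [pvARight_eq arr num _ (index + 1) (by omega), hA]
      have hL : (PySem.List.pyRange 0 index 1).foldl (pvBStep arr num) 0
          = (((arr.take index.toNat).reverse.takeWhile (· == num)).length : Int) := by
        rw [pvB_fold_map, map_pyGetD_range_take arr index hge h2, streak_foldl_eq]
      have hmapR : (PySem.List.pyRange (index + 1) (arr.length : Int) 1).map
            (fun i => PySem.List.pyGetD arr i 0) = arr.drop (index + 1).toNat := by
        exact PySem.List.map_pyGetD_pyRange' arr 0 (by omega)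
      have hR : ((PySem.List.pyRange (index + 1) (arr.length : Int) 1).reverse).foldl
            (pvBStep arr num) 0
          = (((arr.drop (index + 1).toNat).takeWhile (· == num)).length : Int) := by
        rw [pvB_fold_map, List.map_reverse, streak_foldl_eq, List.reverse_reverse, hmapR]
      rw [hL, hR]
    · -- index ≤ -2: left walk is empty, right walk wraps around
      have hneg : index ≤ -2 := by omega
      have hA1 : pvALeft arr num 1 (index - 1) = 1 := by
        rw [pvALeft, dif_neg]
        intro hc; omega
      rw [hA1, pvARight_neg_eq arr num (-(index + 1)).toNat 1 (index + 1) rfl (by omega) (by omega)]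
      have hL : (PySem.List.pyRange 0 index 1).foldl (pvBStep arr num) 0 = 0 := by
        rw [PySem.List.pyRange_one_eq_nil (by omega)]
        rfl
      have hsplit : PySem.List.pyRange (index + 1) (arr.length : Int) 1
          = PySem.List.pyRange (index + 1) 0 1 ++ PySem.List.pyRange 0 (arr.length : Int) 1 :=
        PySem.List.pyRange_one_append _ _ _ (by omega) (by omega)
      have hmapR : (PySem.List.pyRange (index + 1) (arr.length : Int) 1).map
            (fun i => PySem.List.pyGetD arr i 0)
          = arr.drop ((arr.length : Int) + (index + 1)).toNat ++ arr := by
        rw [hsplit, List.map_append, map_pyGetD_range_neg arr (index + 1) (by omega) (by omega)]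
        congr 1
        exact PySem.List.map_pyGetD_pyRange_zero' arr 0
      have hR : ((PySem.List.pyRange (index + 1) (arr.length : Int) 1).reverse).foldl
            (pvBStep arr num) 0
          = (((arr.drop ((arr.length : Int) + (index + 1)).toNat ++ arr).takeWhile (· == num)).length : Int) := by
        rw [pvB_fold_map, List.map_reverse, streak_foldl_eq, List.reverse_reverse, hmapR]
      rw [hL, hR]
      push_cast; ring
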